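-- pv_equiv track=rewrite | github.com/growcacti/VCF-prgs | vcf view_ver1.1.py | parse_vcf_data
-- ===== SOURCE A (Python) =====
-- def parse_vcf_data(vcf_data):
--     contacts = []
--     contact = {}
--
--     for line in vcf_data.splitlines():
--         line = line.strip()
--         if line.startswith("FN:"):
--             contact['Name'] = line[3:]  # Extract name after "FN:"
--         elif line.startswith("TEL:") or line.startswith("TEL;CELL"):
--             contact['Phone'] = line.split(":")[1]  # Extract phone number
--         elif line == "END:VCARD":
--             # If we reached the end of a vCard, add the contact to the list
--             if contact:
--                 contacts.append(contact)
--                 contact = {}  # Reset for the next contact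
--
--     return contacts
-- ===== SOURCE B (Python) =====
-- def parse_vcf_data(vcf_data):
--     contacts = []
--     block = []
--     for raw in vcf_data.splitlines():
--         line = raw.strip()
--         if line == "END:VCARD":
--             contact = {}
--             for l in block:
--                 if l.startswith("FN:"):
--                     contact['Name'] = l[3:]
--                 elif l.startswith("TEL:") or l.startswith("TEL;CELL"):
--                     contact['Phone'] = l.split(":")[1]
--             if contact:
--                 contacts.append(contact)
--             block = []
--         else:
--             block.append(line)
--     return contacts
-- ===== Notes on version B (the rewrite author's own statement) =====
-- stated objective: alternative
-- what changed: B splits the input into record blocks delimited by END:VCARD lines (buffering lines, discarding the trailing unterminated block) and builds each contact dict from its block, instead of A's single pass that mutates one running dict and flushes it on END:VCARD.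
import Mathlib
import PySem

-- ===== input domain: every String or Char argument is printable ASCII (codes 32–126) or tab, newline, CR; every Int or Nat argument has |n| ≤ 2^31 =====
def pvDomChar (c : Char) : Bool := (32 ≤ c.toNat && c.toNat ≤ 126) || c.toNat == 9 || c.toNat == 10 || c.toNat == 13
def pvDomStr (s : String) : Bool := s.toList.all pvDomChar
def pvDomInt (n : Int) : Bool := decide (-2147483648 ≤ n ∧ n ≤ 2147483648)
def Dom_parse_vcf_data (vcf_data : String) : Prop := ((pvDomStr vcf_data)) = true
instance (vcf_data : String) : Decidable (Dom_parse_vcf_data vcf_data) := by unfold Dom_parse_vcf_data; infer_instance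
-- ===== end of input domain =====

-- B parses END:VCARD-terminated record blocks (buffer + flush) instead of A's single mutated running dict; return-value equivalence on inputs where A does not raise IndexError.


-- ===== PORT A =====
-- line.split(":")[1]; the `none` case is Python's IndexError (excluded by Pre_), ported as ""
def pvSplitColon1 (line : String) : String :=
  (PySem.List.pyGet? ((PySem.Str.split? line ":").getD []) 1).getD ""

-- loop body of A: state = (contacts so far, current running contact dict)
def pvAstep (st : List (PySem.Dict String String) × PySem.Dict String String) (raw : String) :
    List (PySem.Dict String String) × PySem.Dict String String :=
  let line := PySem.Str.strip raw
  if PySem.Str.startswith line "FN:" then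
    (st.1, st.2.insert "Name" (PySem.Str.slice line (some 3) none))
  else if PySem.Str.startswith line "TEL:" || PySem.Str.startswith line "TEL;CELL" then
    (st.1, st.2.insert "Phone" (pvSplitColon1 line))
  else if line = "END:VCARD" then
    if st.2.items.isEmpty = false then (st.1 ++ [st.2], PySem.Dict.empty) else st
  else st

def parse_vcf_data (vcf_data : String) : List (List (String × String)) :=
  (((PySem.Str.splitlines vcf_data).foldl pvAstep ([], PySem.Dict.empty)).1).map (·.items)

-- ===== PORT B =====
-- build one contact dict from a (stripped) block of lines
def pvBrecord (block : List String) : PySem.Dict String String :=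
  block.foldl (fun contact l =>
    if PySem.Str.startswith l "FN:" then
      contact.insert "Name" (PySem.Str.slice l (some 3) none)
    else if PySem.Str.startswith l "TEL:" || PySem.Str.startswith l "TEL;CELL" then
      contact.insert "Phone" (pvSplitColon1 l)
    else contact) PySem.Dict.empty

-- loop body of B: state = (contacts so far, buffered stripped lines of the open block)
def pvBstep (st : List (PySem.Dict String String) × List String) (raw : String) :
    List (PySem.Dict String String) × List String :=
  let line := PySem.Str.strip raw
  if line = "END:VCARD" then
    let contact := pvBrecord st.2
    (if contact.items.isEmpty = false then st.1 ++ [contact] else st.1, [])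
  else (st.1, st.2 ++ [line])

def parse_vcf_data_alt (vcf_data : String) : List (List (String × String)) :=
  (((PySem.Str.splitlines vcf_data).foldl pvBstep ([], [])).1).map (·.items)

-- ===== PRECONDITION & SPEC =====
-- Pre_ excludes exactly the inputs where A raises IndexError: a stripped line starting with "TEL;CELL" and containing no ":".
def Pre_parse_vcf_data (vcf_data : String) : Prop :=
  ∀ l ∈ PySem.Str.splitlines vcf_data,
    PySem.Str.startswith (PySem.Str.strip l) "TEL;CELL" = true →
    PySem.Str.isIn ":" (PySem.Str.strip l) = true
instance (vcf_data : String) : Decidable (Pre_parse_vcf_data vcf_data) := by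
  unfold Pre_parse_vcf_data; infer_instance

def pvWitness_parse_vcf_data : String := "BEGIN:VCARD\nFN:Bob\nTEL:123\nEND:VCARD"

def Spec_parse_vcf_data (vcf_data : String) (out : List (List (String × String))) : Prop := out = parse_vcf_data_alt vcf_data
instance (vcf_data : String) (out : List (List (String × String))) : Decidable (Spec_parse_vcf_data vcf_data out) := by unfold Spec_parse_vcf_data; infer_instance

-- ===== CLAIM (what is proved, stated in full; the proofs are below) =====
def Claim_equal_parse_vcf_data : Prop := ∀ (vcf_data : String), Dom_parse_vcf_data vcf_data → Pre_parse_vcf_data vcf_data → Spec_parse_vcf_data vcf_data (parse_vcf_data vcf_data)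


-- ===== LEMMAS AND PROOFS =====

-- key loop correspondence: A's running dict is B's record function applied to B's buffer
theorem pvFold_corr (lines : List String)
    (cs : List (PySem.Dict String String)) (buf : List String) :
    (lines.foldl pvAstep (cs, pvBrecord buf)).1 = (lines.foldl pvBstep (cs, buf)).1 ∧
    (lines.foldl pvAstep (cs, pvBrecord buf)).2 =
      pvBrecord (lines.foldl pvBstep (cs, buf)).2 := by
  induction lines generalizing cs buf with
  | nil => exact ⟨rfl, rfl⟩
  | cons raw rest ih =>
    simp only [List.foldl_cons]
    have e0 : pvBrecord ([] : List String) = PySem.Dict.empty := by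
      unfold pvBrecord; rfl
    by_cases hend : PySem.Str.strip raw = "END:VCARD"
    · have h1 : PySem.Chars.startswith ['E','N','D',':','V','C','A','R','D'] ['F','N',':'] = false := by decide
      have h2 : PySem.Chars.startswith ['E','N','D',':','V','C','A','R','D'] ['T','E','L',':'] = false := by decide
      have h3 : PySem.Chars.startswith ['E','N','D',':','V','C','A','R','D'] ['T','E','L',';','C','E','L','L'] = false := by decide
      by_cases hne : (pvBrecord buf).items = []
      · have h0 : pvBrecord buf = PySem.Dict.empty := PySem.Dict.ext (by simpa using hne)
        have hA' : pvAstep (cs, pvBrecord buf) raw = (cs, pvBrecord buf) := by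
          simp [pvAstep, hend, h1, h2, h3, hne]
        have hB' : pvBstep (cs, buf) raw = (cs, []) := by
          simp [pvBstep, hend, hne]
        rw [hA', hB']
        have e : pvBrecord buf = pvBrecord [] := by rw [h0, e0]
        rw [e]; exact ih cs []
      · have hA' : pvAstep (cs, pvBrecord buf) raw = (cs ++ [pvBrecord buf], PySem.Dict.empty) := by
          simp [pvAstep, hend, h1, h2, h3, hne]
        have hB' : pvBstep (cs, buf) raw = (cs ++ [pvBrecord buf], []) := by
          simp [pvBstep, hend, hne]
        rw [hA', hB', show PySem.Dict.empty = pvBrecord ([] : List String) from e0.symm]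
        exact ih (cs ++ [pvBrecord buf]) []
    · have hB' : pvBstep (cs, buf) raw = (cs, buf ++ [PySem.Str.strip raw]) := by
        simp [pvBstep, hend]
      have hA' : pvAstep (cs, pvBrecord buf) raw = (cs, pvBrecord (buf ++ [PySem.Str.strip raw])) := by
        by_cases hfn : PySem.Chars.startswith (PySem.Chars.strip raw.toList) ['F','N',':'] = true
        · simp [pvAstep, pvBrecord, List.foldl_append, hfn]
        · by_cases ht1 : PySem.Chars.startswith (PySem.Chars.strip raw.toList) ['T','E','L',':'] = true
          · simp [pvAstep, pvBrecord, List.foldl_append, hfn, ht1]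
          · by_cases ht2 : PySem.Chars.startswith (PySem.Chars.strip raw.toList) ['T','E','L',';','C','E','L','L'] = true
            · simp [pvAstep, pvBrecord, List.foldl_append, hfn, ht1, ht2]
            · simp [pvAstep, pvBrecord, List.foldl_append, hfn, ht1, ht2, hend]
      rw [hA', hB']
      exact ih cs (buf ++ [PySem.Str.strip raw])

-- ===== VERDICT (by name: the statement is the Claim_ definition above) =====
theorem parse_vcf_data_spec : Claim_equal_parse_vcf_data := by
  intro v _ _
  unfold Spec_parse_vcf_data parse_vcf_data parse_vcf_data_alt
  have h := pvFold_corr (PySem.Str.splitlines v) [] []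
  have h0 : pvBrecord [] = PySem.Dict.empty := rfl
  rw [h0] at h
  rw [h.1]
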